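-- pv_equiv track=rewrite | github.com/piyush-pb/project-samarth | backend/src/query_processor.py | _is_crop_type_match
-- ===== SOURCE A (Python) =====
-- from typing import Any, Dict, Iterable, List, Mapping, MutableMapping, Optional, Tuple
--
-- def _is_crop_type_match(crop_name: str, crop_types: List[str]) -> bool:
--     """Check if a crop belongs to the specified crop type"""
--
--     crop_name_lower = crop_name.lower()
--
--     cereals = ['rice', 'wheat', 'maize', 'bajra', 'jowar', 'ragi', 'barley', 'other cereals']
--     pulses = ['arhar', 'tur', 'moong', 'urad', 'masoor', 'gram', 'lentil', 'peas', 'other pulses']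
--     oilseeds = ['groundnut', 'sunflower', 'soyabean', 'rapeseed', 'mustard', 'safflower', 'niger', 'sesamum']
--     cash_crops = ['cotton', 'sugarcane', 'tobacco', 'jute']
--
--     for crop_type in crop_types:
--         if crop_type.lower() == 'cereal':
--             if any(c in crop_name_lower for c in cereals):
--                 return True
--         elif crop_type.lower() == 'pulse':
--             if any(c in crop_name_lower for c in pulses):
--                 return True
--         elif crop_type.lower() == 'oilseed':
--             if any(c in crop_name_lower for c in oilseeds):
--                 return True
--         elif crop_type.lower() == 'cash crop':
--             if any(c in crop_name_lower for c in cash_crops):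
--                 return True
--
--     return False
-- ===== SOURCE B (Python) =====
-- def _is_crop_type_match(crop_name, crop_types):
--     """Check if a crop belongs to the specified crop type"""
--     crop_name_lower = crop_name.lower()
--
--     matched = set()
--     if any(c in crop_name_lower for c in ['rice', 'wheat', 'maize', 'bajra', 'jowar', 'ragi', 'barley', 'other cereals']):
--         matched.add('cereal')
--     if any(c in crop_name_lower for c in ['arhar', 'tur', 'moong', 'urad', 'masoor', 'gram', 'lentil', 'peas', 'other pulses']):
--         matched.add('pulse')
--     if any(c in crop_name_lower for c in ['groundnut', 'sunflower', 'soyabean', 'rapeseed', 'mustard', 'safflower', 'niger', 'sesamum']):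
--         matched.add('oilseed')
--     if any(c in crop_name_lower for c in ['cotton', 'sugarcane', 'tobacco', 'jute']):
--         matched.add('cash crop')
--
--     for crop_type in crop_types:
--         if crop_type.lower() in matched:
--             return True
--     return False
-- ===== Notes on version B (the rewrite author's own statement) =====
-- stated objective: simpler
-- what changed: B precomputes once which of the four categories the crop name belongs to (a set of category labels), then does a single membership pass over crop_types, instead of A's per-crop_type branch chain that rescans a category keyword list on each iteration.
import Mathlib
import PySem

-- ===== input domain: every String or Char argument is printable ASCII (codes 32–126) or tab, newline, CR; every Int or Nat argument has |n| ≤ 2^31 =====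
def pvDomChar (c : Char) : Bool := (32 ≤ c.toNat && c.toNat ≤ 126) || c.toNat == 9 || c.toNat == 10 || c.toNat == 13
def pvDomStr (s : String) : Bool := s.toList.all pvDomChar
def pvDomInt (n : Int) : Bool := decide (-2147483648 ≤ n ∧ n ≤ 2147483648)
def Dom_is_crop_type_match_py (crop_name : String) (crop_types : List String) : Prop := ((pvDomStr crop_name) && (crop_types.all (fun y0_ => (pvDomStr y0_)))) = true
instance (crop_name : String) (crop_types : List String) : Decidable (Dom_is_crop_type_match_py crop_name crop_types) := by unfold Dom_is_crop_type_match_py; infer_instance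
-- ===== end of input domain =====

-- B precomputes once which categories the crop name matches, then does a single membership pass over crop_types (objective: simpler decomposition; same results).


-- ===== PORT A =====
def cropCereals : List String := ["rice", "wheat", "maize", "bajra", "jowar", "ragi", "barley", "other cereals"]
def cropPulses : List String := ["arhar", "tur", "moong", "urad", "masoor", "gram", "lentil", "peas", "other pulses"]
def cropOilseeds : List String := ["groundnut", "sunflower", "soyabean", "rapeseed", "mustard", "safflower", "niger", "sesamum"]
def cropCashCrops : List String := ["cotton", "sugarcane", "tobacco", "jute"]

-- A's loop: branch on crop_type.lower(); return True when a keyword of that category occurs in crop_name_lower, otherwise continue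
def aCropLoop (crop_name_lower : String) : List String → Bool
  | [] => false
  | ct :: rest =>
    if PySem.Str.lower ct == "cereal" then
      (if cropCereals.any (fun c => PySem.Str.isIn c crop_name_lower) then true
       else aCropLoop crop_name_lower rest)
    else if PySem.Str.lower ct == "pulse" then
      (if cropPulses.any (fun c => PySem.Str.isIn c crop_name_lower) then true
       else aCropLoop crop_name_lower rest)
    else if PySem.Str.lower ct == "oilseed" then
      (if cropOilseeds.any (fun c => PySem.Str.isIn c crop_name_lower) then true
       else aCropLoop crop_name_lower rest)
    else if PySem.Str.lower ct == "cash crop" then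
      (if cropCashCrops.any (fun c => PySem.Str.isIn c crop_name_lower) then true
       else aCropLoop crop_name_lower rest)
    else aCropLoop crop_name_lower rest

def is_crop_type_match_py (crop_name : String) (crop_types : List String) : Bool :=
  aCropLoop (PySem.Str.lower crop_name) crop_types

-- ===== PORT B =====
-- B: build the set of category labels the crop name matches, then one membership pass over crop_types
def bMatchedSet (crop_name_lower : String) : PySem.Set String :=
  let m0 : PySem.Set String := PySem.Set.empty
  let m1 := if cropCereals.any (fun c => PySem.Str.isIn c crop_name_lower) then PySem.Set.add m0 "cereal" else m0
  let m2 := if cropPulses.any (fun c => PySem.Str.isIn c crop_name_lower) then PySem.Set.add m1 "pulse" else m1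
  let m3 := if cropOilseeds.any (fun c => PySem.Str.isIn c crop_name_lower) then PySem.Set.add m2 "oilseed" else m2
  if cropCashCrops.any (fun c => PySem.Str.isIn c crop_name_lower) then PySem.Set.add m3 "cash crop" else m3

def is_crop_type_match_py_alt (crop_name : String) (crop_types : List String) : Bool :=
  let matched := bMatchedSet (PySem.Str.lower crop_name)
  crop_types.any (fun ct => PySem.Set.contains matched (PySem.Str.lower ct))

-- ===== PRECONDITION & SPEC =====
def Spec_is_crop_type_match_py (crop_name : String) (crop_types : List String) (out : Bool) : Prop := out = is_crop_type_match_py_alt crop_name crop_types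
instance (crop_name : String) (crop_types : List String) (out : Bool) : Decidable (Spec_is_crop_type_match_py crop_name crop_types out) := by unfold Spec_is_crop_type_match_py; infer_instance

-- ===== CLAIM (what is proved, stated in full; the proofs are below) =====
def Claim_equal_is_crop_type_match_py : Prop := ∀ (crop_name : String) (crop_types : List String), Dom_is_crop_type_match_py crop_name crop_types → Spec_is_crop_type_match_py crop_name crop_types (is_crop_type_match_py crop_name crop_types)

-- ===== LEMMAS AND PROOFS =====

-- membership in B's four-step conditional set build, over arbitrary hit booleans a b c d
theorem contains_build (a b c d : Bool) (s : String) :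
    PySem.Set.contains
      (if d then PySem.Set.add (if c then PySem.Set.add (if b then PySem.Set.add (if a then PySem.Set.add PySem.Set.empty "cereal" else PySem.Set.empty) "pulse" else (if a then PySem.Set.add PySem.Set.empty "cereal" else PySem.Set.empty)) "oilseed" else (if b then PySem.Set.add (if a then PySem.Set.add PySem.Set.empty "cereal" else PySem.Set.empty) "pulse" else (if a then PySem.Set.add PySem.Set.empty "cereal" else PySem.Set.empty))) "cash crop" else (if c then PySem.Set.add (if b then PySem.Set.add (if a then PySem.Set.add PySem.Set.empty "cereal" else PySem.Set.empty) "pulse" else (if a then PySem.Set.add PySem.Set.empty "cereal" else PySem.Set.empty)) "oilseed" else (if b then PySem.Set.add (if a then PySem.Set.add PySem.Set.empty "cereal" else PySem.Set.empty) "pulse" else (if a then PySem.Set.add PySem.Set.empty "cereal" else PySem.Set.empty)))) s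
    = ((s == "cereal") && a || (s == "pulse") && b || (s == "oilseed") && c || (s == "cash crop") && d) := by
  cases a <;> cases b <;> cases c <;> cases d <;>
    simp [PySem.Set.add, PySem.Set.empty, PySem.Set.contains] <;>
    cases hb : (s == "cereal") <;> cases hp : (s == "pulse") <;>
    cases ho : (s == "oilseed") <;> cases hc : (s == "cash crop") <;> simp_all

-- membership in B's precomputed set, as a boolean formula over the four category hits
theorem contains_bMatchedSet (l s : String) :
    PySem.Set.contains (bMatchedSet l) s =
      ((s == "cereal") && cropCereals.any (fun c => PySem.Str.isIn c l)
       || (s == "pulse") && cropPulses.any (fun c => PySem.Str.isIn c l)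
       || (s == "oilseed") && cropOilseeds.any (fun c => PySem.Str.isIn c l)
       || (s == "cash crop") && cropCashCrops.any (fun c => PySem.Str.isIn c l)) := by
  rw [show bMatchedSet l = _ from rfl]
  exact contains_build _ _ _ _ s

-- A's loop equals B's single membership pass
theorem aCropLoop_eq_any (l : String) (ts : List String) :
    aCropLoop l ts = ts.any (fun ct => PySem.Set.contains (bMatchedSet l) (PySem.Str.lower ct)) := by
  induction ts with
  | nil => rfl
  | cons ct rest ih =>
    rw [List.any_cons, contains_bMatchedSet]
    simp only [aCropLoop]
    rw [ih]
    generalize cropCereals.any (fun c => PySem.Str.isIn c l) = a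
    generalize cropPulses.any (fun c => PySem.Str.isIn c l) = b
    generalize cropOilseeds.any (fun c => PySem.Str.isIn c l) = c
    generalize cropCashCrops.any (fun c => PySem.Str.isIn c l) = d
    by_cases h1 : PySem.Str.lower ct = "cereal" <;>
    by_cases h2 : PySem.Str.lower ct = "pulse" <;>
    by_cases h3 : PySem.Str.lower ct = "oilseed" <;>
    by_cases h4 : PySem.Str.lower ct = "cash crop" <;>
      simp_all

-- ===== VERDICT (by name: the statement is the Claim_ definition above) =====
theorem is_crop_type_match_py_spec : Claim_equal_is_crop_type_match_py := by
  intro crop_name crop_types _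
  show is_crop_type_match_py crop_name crop_types = is_crop_type_match_py_alt crop_name crop_types
  unfold is_crop_type_match_py is_crop_type_match_py_alt
  exact aCropLoop_eq_any _ _
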